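/- GENERATED by farm/mkstatement.py — do not edit. EVERY unit statement of the proof farm, imported together: this module
   compiles iff every statement compiles and no two units define the same name (420 units, one namespace each). -/
import Vorbis.Spec.Units.asan_register_globals
import Vorbis.Spec.Units.sub_I_65535_1
import Vorbis.Spec.Units.run_ctors
import Vorbis.Spec.Units.asan_load4_noabort
import Vorbis.Spec.Units.asan_store4_noabort
import Vorbis.Spec.Units.asan_load8_noabort
import Vorbis.Spec.Units.copy_frame
import Vorbis.Spec.Units.put_header
import Vorbis.Spec.Units.free
import Vorbis.Spec.Units.setup_free
import Vorbis.Spec.Units.asan_load1_noabort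
import Vorbis.Spec.Units.vorbis_deinit_1
import Vorbis.Spec.Units.vorbis_deinit_2
import Vorbis.Spec.Units.vorbis_deinit_3
import Vorbis.Spec.Units.vorbis_deinit_4
import Vorbis.Spec.Units.vorbis_deinit_COMPOSITION
import Vorbis.Spec.Units.stb_vorbis_close
import Vorbis.Spec.Units.stb_vorbis_get_error
import Vorbis.Spec.Units.asan_store8_noabort
import Vorbis.Spec.Units.get_window
import Vorbis.Spec.Units.vorbis_finish_frame
import Vorbis.Spec.Units.vorbis_finish_frame_1
import Vorbis.Spec.Units.vorbis_finish_frame_2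
import Vorbis.Spec.Units.vorbis_finish_frame_3
import Vorbis.Spec.Units.vorbis_finish_frame_4
import Vorbis.Spec.Units.vorbis_finish_frame_5
import Vorbis.Spec.Units.vorbis_finish_frame_COMPOSITION
import Vorbis.Spec.Units.asan_store1_noabort
import Vorbis.Spec.Units.asan_load2_noabort
import Vorbis.Spec.Units.asan_store2_noabort
import Vorbis.Spec.Units.memcpy
import Vorbis.Spec.Units.memset
import Vorbis.Spec.Units.error
import Vorbis.Spec.Units.ilog
import Vorbis.Spec.Units.abs
import Vorbis.Spec.Units.predict_point
import Vorbis.Spec.Units.draw_line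
import Vorbis.Spec.Units.do_floor
import Vorbis.Spec.Units.imdct_step3_iter0_loop_1
import Vorbis.Spec.Units.imdct_step3_iter0_loop_2
import Vorbis.Spec.Units.imdct_step3_iter0_loop_3
import Vorbis.Spec.Units.imdct_step3_iter0_loop_4
import Vorbis.Spec.Units.imdct_step3_iter0_loop_COMPOSITION
import Vorbis.Spec.Units.imdct_step3_inner_r_loop_1
import Vorbis.Spec.Units.imdct_step3_inner_r_loop_2
import Vorbis.Spec.Units.imdct_step3_inner_r_loop_3
import Vorbis.Spec.Units.imdct_step3_inner_r_loop_4
import Vorbis.Spec.Units.imdct_step3_inner_r_loop_COMPOSITION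
import Vorbis.Spec.Units.imdct_step3_inner_s_loop_1
import Vorbis.Spec.Units.imdct_step3_inner_s_loop_2
import Vorbis.Spec.Units.imdct_step3_inner_s_loop_3
import Vorbis.Spec.Units.imdct_step3_inner_s_loop_COMPOSITION
import Vorbis.Spec.Units.iter_54
import Vorbis.Spec.Units.imdct_step3_inner_s_loop_ld654_1
import Vorbis.Spec.Units.imdct_step3_inner_s_loop_ld654_2
import Vorbis.Spec.Units.imdct_step3_inner_s_loop_ld654_3
import Vorbis.Spec.Units.imdct_step3_inner_s_loop_ld654_COMPOSITION
import Vorbis.Spec.Units.arena_unpoison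
import Vorbis.Spec.Units.malloc
import Vorbis.Spec.Units.setup_temp_malloc
import Vorbis.Spec.Units.arena_poison
import Vorbis.Spec.Units.arena_temp_restore
import Vorbis.Spec.Units.inverse_mdct_1
import Vorbis.Spec.Units.inverse_mdct_2
import Vorbis.Spec.Units.inverse_mdct_3
import Vorbis.Spec.Units.inverse_mdct_4
import Vorbis.Spec.Units.inverse_mdct_5
import Vorbis.Spec.Units.inverse_mdct_6
import Vorbis.Spec.Units.inverse_mdct_7
import Vorbis.Spec.Units.inverse_mdct_7a
import Vorbis.Spec.Units.inverse_mdct_7b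
import Vorbis.Spec.Units.inverse_mdct_8
import Vorbis.Spec.Units.inverse_mdct_9
import Vorbis.Spec.Units.inverse_mdct_10
import Vorbis.Spec.Units.inverse_mdct_11
import Vorbis.Spec.Units.inverse_mdct_12
import Vorbis.Spec.Units.inverse_mdct_COMPOSITION
import Vorbis.Spec.Units.get8
import Vorbis.Spec.Units.capture_pattern
import Vorbis.Spec.Units.get32
import Vorbis.Spec.Units.getn
import Vorbis.Spec.Units.stb_vorbis_get_file_offset
import Vorbis.Spec.Units.start_page_no_capturepattern
import Vorbis.Spec.Units.start_page
import Vorbis.Spec.Units.next_segment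
import Vorbis.Spec.Units.get8_packet_raw
import Vorbis.Spec.Units.get_bits_24
import Vorbis.Spec.Units.get_bits
import Vorbis.Spec.Units.prep_huffman
import Vorbis.Spec.Units.bit_reverse
import Vorbis.Spec.Units.codebook_decode_scalar_raw_1
import Vorbis.Spec.Units.codebook_decode_scalar_raw_2
import Vorbis.Spec.Units.codebook_decode_scalar_raw_3
import Vorbis.Spec.Units.codebook_decode_scalar_raw_4
import Vorbis.Spec.Units.codebook_decode_scalar_raw_COMPOSITION
import Vorbis.Spec.Units.make_block_array
import Vorbis.Spec.Units.codebook_decode_deinterleave_repeat_1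
import Vorbis.Spec.Units.codebook_decode_deinterleave_repeat_2
import Vorbis.Spec.Units.codebook_decode_deinterleave_repeat_2a
import Vorbis.Spec.Units.codebook_decode_deinterleave_repeat_2b
import Vorbis.Spec.Units.codebook_decode_deinterleave_repeat_2c
import Vorbis.Spec.Units.codebook_decode_deinterleave_repeat_2d
import Vorbis.Spec.Units.codebook_decode_deinterleave_repeat_3
import Vorbis.Spec.Units.codebook_decode_deinterleave_repeat_4
import Vorbis.Spec.Units.codebook_decode_deinterleave_repeat_5
import Vorbis.Spec.Units.codebook_decode_deinterleave_repeat_6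
import Vorbis.Spec.Units.codebook_decode_deinterleave_repeat_7
import Vorbis.Spec.Units.codebook_decode_deinterleave_repeat_COMPOSITION
import Vorbis.Spec.Units.codebook_decode_start
import Vorbis.Spec.Units.codebook_decode_step
import Vorbis.Spec.Units.codebook_decode
import Vorbis.Spec.Units.residue_decode
import Vorbis.Spec.Units.decode_residue_1
import Vorbis.Spec.Units.decode_residue_1a
import Vorbis.Spec.Units.decode_residue_1b
import Vorbis.Spec.Units.decode_residue_1c
import Vorbis.Spec.Units.decode_residue_1d
import Vorbis.Spec.Units.decode_residue_2
import Vorbis.Spec.Units.decode_residue_3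
import Vorbis.Spec.Units.decode_residue_4
import Vorbis.Spec.Units.decode_residue_4a
import Vorbis.Spec.Units.decode_residue_4b
import Vorbis.Spec.Units.decode_residue_5
import Vorbis.Spec.Units.decode_residue_6
import Vorbis.Spec.Units.decode_residue_6a
import Vorbis.Spec.Units.decode_residue_6b
import Vorbis.Spec.Units.decode_residue_6ba
import Vorbis.Spec.Units.decode_residue_6bb
import Vorbis.Spec.Units.decode_residue_7
import Vorbis.Spec.Units.decode_residue_7a
import Vorbis.Spec.Units.decode_residue_7b
import Vorbis.Spec.Units.decode_residue_7c
import Vorbis.Spec.Units.decode_residue_8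
import Vorbis.Spec.Units.decode_residue_9
import Vorbis.Spec.Units.decode_residue_10
import Vorbis.Spec.Units.decode_residue_11
import Vorbis.Spec.Units.decode_residue_COMPOSITION
import Vorbis.Spec.Units.flush_packet
import Vorbis.Spec.Units.vorbis_decode_packet_rest_1
import Vorbis.Spec.Units.vorbis_decode_packet_rest_1a
import Vorbis.Spec.Units.vorbis_decode_packet_rest_1b
import Vorbis.Spec.Units.vorbis_decode_packet_rest_2
import Vorbis.Spec.Units.vorbis_decode_packet_rest_2a
import Vorbis.Spec.Units.vorbis_decode_packet_rest_2b
import Vorbis.Spec.Units.vorbis_decode_packet_rest_2c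
import Vorbis.Spec.Units.vorbis_decode_packet_rest_2d
import Vorbis.Spec.Units.vorbis_decode_packet_rest_3
import Vorbis.Spec.Units.vorbis_decode_packet_rest_3a
import Vorbis.Spec.Units.vorbis_decode_packet_rest_3b
import Vorbis.Spec.Units.vorbis_decode_packet_rest_3c
import Vorbis.Spec.Units.vorbis_decode_packet_rest_4
import Vorbis.Spec.Units.vorbis_decode_packet_rest_4a
import Vorbis.Spec.Units.vorbis_decode_packet_rest_4b
import Vorbis.Spec.Units.vorbis_decode_packet_rest_4c
import Vorbis.Spec.Units.vorbis_decode_packet_rest_4d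
import Vorbis.Spec.Units.vorbis_decode_packet_rest_4e
import Vorbis.Spec.Units.vorbis_decode_packet_rest_5
import Vorbis.Spec.Units.vorbis_decode_packet_rest_5a
import Vorbis.Spec.Units.vorbis_decode_packet_rest_5b
import Vorbis.Spec.Units.vorbis_decode_packet_rest_5c
import Vorbis.Spec.Units.vorbis_decode_packet_rest_6
import Vorbis.Spec.Units.vorbis_decode_packet_rest_7
import Vorbis.Spec.Units.vorbis_decode_packet_rest_8
import Vorbis.Spec.Units.vorbis_decode_packet_rest_9
import Vorbis.Spec.Units.vorbis_decode_packet_rest_10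
import Vorbis.Spec.Units.vorbis_decode_packet_rest_11
import Vorbis.Spec.Units.vorbis_decode_packet_rest_12
import Vorbis.Spec.Units.vorbis_decode_packet_rest_13
import Vorbis.Spec.Units.vorbis_decode_packet_rest_14
import Vorbis.Spec.Units.vorbis_decode_packet_rest_15
import Vorbis.Spec.Units.vorbis_decode_packet_rest_16
import Vorbis.Spec.Units.vorbis_decode_packet_rest_COMPOSITION
import Vorbis.Spec.Units.get8_packet
import Vorbis.Spec.Units.start_packet
import Vorbis.Spec.Units.maybe_start_packet
import Vorbis.Spec.Units.vorbis_decode_initial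
import Vorbis.Spec.Units.vorbis_decode_initial_1
import Vorbis.Spec.Units.vorbis_decode_initial_2
import Vorbis.Spec.Units.vorbis_decode_initial_3
import Vorbis.Spec.Units.vorbis_decode_initial_4
import Vorbis.Spec.Units.vorbis_decode_initial_5
import Vorbis.Spec.Units.vorbis_decode_initial_6
import Vorbis.Spec.Units.vorbis_decode_initial_7
import Vorbis.Spec.Units.vorbis_decode_initial_8
import Vorbis.Spec.Units.vorbis_decode_initial_9
import Vorbis.Spec.Units.vorbis_decode_initial_COMPOSITION
import Vorbis.Spec.Units.vorbis_decode_packet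
import Vorbis.Spec.Units.stb_vorbis_get_frame_float
import Vorbis.Spec.Units.stb_vorbis_get_frame_float_1
import Vorbis.Spec.Units.stb_vorbis_get_frame_float_2
import Vorbis.Spec.Units.stb_vorbis_get_frame_float_3
import Vorbis.Spec.Units.stb_vorbis_get_frame_float_4
import Vorbis.Spec.Units.stb_vorbis_get_frame_float_5
import Vorbis.Spec.Units.stb_vorbis_get_frame_float_6
import Vorbis.Spec.Units.stb_vorbis_get_frame_float_COMPOSITION
import Vorbis.Spec.Units.range_bad
import Vorbis.Spec.Units.asan_storeN_noabort
import Vorbis.Spec.Units.asan_load16_noabort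
import Vorbis.Spec.Units.asan_store16_noabort
import Vorbis.Spec.Units.vorbis_init
import Vorbis.Spec.Units.setup_malloc
import Vorbis.Spec.Units.vorbis_alloc
import Vorbis.Spec.Units.vorbis_pump_first_frame
import Vorbis.Spec.Units.swap_bytes
import Vorbis.Spec.Units.uint32_compare
import Vorbis.Spec.Units.point_compare
import Vorbis.Spec.Units.sift_down
import Vorbis.Spec.Units.qsort
import Vorbis.Spec.Units.crc32_init
import Vorbis.Spec.Units.compute_accelerated_huffman
import Vorbis.Spec.Units.neighbors
import Vorbis.Spec.Units.skip
import Vorbis.Spec.Units.add_entry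
import Vorbis.Spec.Units.compute_codewords
import Vorbis.Spec.Units.compute_codewords_1
import Vorbis.Spec.Units.compute_codewords_2
import Vorbis.Spec.Units.compute_codewords_3
import Vorbis.Spec.Units.compute_codewords_4
import Vorbis.Spec.Units.compute_codewords_5
import Vorbis.Spec.Units.compute_codewords_6
import Vorbis.Spec.Units.compute_codewords_7
import Vorbis.Spec.Units.compute_codewords_8
import Vorbis.Spec.Units.compute_codewords_9
import Vorbis.Spec.Units.compute_codewords_COMPOSITION
import Vorbis.Spec.Units.setup_temp_free
import Vorbis.Spec.Units.include_in_sort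
import Vorbis.Spec.Units.compute_sorted_huffman_1
import Vorbis.Spec.Units.compute_sorted_huffman_2
import Vorbis.Spec.Units.compute_sorted_huffman_3
import Vorbis.Spec.Units.compute_sorted_huffman_4
import Vorbis.Spec.Units.compute_sorted_huffman_COMPOSITION
import Vorbis.Spec.Units.memcmp
import Vorbis.Spec.Units.vorbis_validate
import Vorbis.Spec.Units.two_to
import Vorbis.Spec.Units.ldexp
import Vorbis.Spec.Units.float32_unpack
import Vorbis.Spec.Units.floor
import Vorbis.Spec.Units.exp
import Vorbis.Spec.Units.log
import Vorbis.Spec.Units.pow_int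
import Vorbis.Spec.Units.pow
import Vorbis.Spec.Units.lookup1_values
import Vorbis.Spec.Units.compute_bitreverse
import Vorbis.Spec.Units.sin_poly
import Vorbis.Spec.Units.cos_poly
import Vorbis.Spec.Units.sincos_quadrant
import Vorbis.Spec.Units.sin
import Vorbis.Spec.Units.cos
import Vorbis.Spec.Units.compute_twiddle_factors
import Vorbis.Spec.Units.square
import Vorbis.Spec.Units.compute_window
import Vorbis.Spec.Units.init_blocksize
import Vorbis.Spec.Units.get32_packet
import Vorbis.Spec.Units.start_decoder_1
import Vorbis.Spec.Units.start_decoder_2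
import Vorbis.Spec.Units.start_decoder_2a
import Vorbis.Spec.Units.start_decoder_2b
import Vorbis.Spec.Units.start_decoder_2c
import Vorbis.Spec.Units.start_decoder_2d
import Vorbis.Spec.Units.start_decoder_3
import Vorbis.Spec.Units.start_decoder_4
import Vorbis.Spec.Units.start_decoder_5
import Vorbis.Spec.Units.start_decoder_6
import Vorbis.Spec.Units.start_decoder_7
import Vorbis.Spec.Units.start_decoder_8
import Vorbis.Spec.Units.start_decoder_9
import Vorbis.Spec.Units.start_decoder_9a
import Vorbis.Spec.Units.start_decoder_9b
import Vorbis.Spec.Units.start_decoder_9c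
import Vorbis.Spec.Units.start_decoder_9d
import Vorbis.Spec.Units.start_decoder_9e
import Vorbis.Spec.Units.start_decoder_9f
import Vorbis.Spec.Units.start_decoder_ERR
import Vorbis.Spec.Units.start_decoder_C1
import Vorbis.Spec.Units.start_decoder_C2
import Vorbis.Spec.Units.start_decoder_C2a
import Vorbis.Spec.Units.start_decoder_C2b
import Vorbis.Spec.Units.start_decoder_C2c
import Vorbis.Spec.Units.start_decoder_C2d
import Vorbis.Spec.Units.start_decoder_C3
import Vorbis.Spec.Units.start_decoder_C3a
import Vorbis.Spec.Units.start_decoder_C3b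
import Vorbis.Spec.Units.start_decoder_C3c
import Vorbis.Spec.Units.start_decoder_C4
import Vorbis.Spec.Units.start_decoder_C4a
import Vorbis.Spec.Units.start_decoder_C4b
import Vorbis.Spec.Units.start_decoder_C4c
import Vorbis.Spec.Units.start_decoder_C4d
import Vorbis.Spec.Units.start_decoder_C5
import Vorbis.Spec.Units.start_decoder_C5a
import Vorbis.Spec.Units.start_decoder_C5b
import Vorbis.Spec.Units.start_decoder_C5c
import Vorbis.Spec.Units.start_decoder_C5d
import Vorbis.Spec.Units.start_decoder_C5e
import Vorbis.Spec.Units.start_decoder_C6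
import Vorbis.Spec.Units.start_decoder_C6a
import Vorbis.Spec.Units.start_decoder_C6b
import Vorbis.Spec.Units.start_decoder_C6c
import Vorbis.Spec.Units.start_decoder_C6d
import Vorbis.Spec.Units.start_decoder_C6e
import Vorbis.Spec.Units.start_decoder_C7
import Vorbis.Spec.Units.start_decoder_C7a
import Vorbis.Spec.Units.start_decoder_C7b
import Vorbis.Spec.Units.start_decoder_C8
import Vorbis.Spec.Units.start_decoder_C8a
import Vorbis.Spec.Units.start_decoder_C8b
import Vorbis.Spec.Units.start_decoder_C8c
import Vorbis.Spec.Units.start_decoder_C8d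
import Vorbis.Spec.Units.start_decoder_C8e
import Vorbis.Spec.Units.start_decoder_C8f
import Vorbis.Spec.Units.start_decoder_C9
import Vorbis.Spec.Units.start_decoder_C9a
import Vorbis.Spec.Units.start_decoder_C9b
import Vorbis.Spec.Units.start_decoder_C9c
import Vorbis.Spec.Units.start_decoder_C9d
import Vorbis.Spec.Units.start_decoder_C10
import Vorbis.Spec.Units.start_decoder_C11
import Vorbis.Spec.Units.start_decoder_C11a
import Vorbis.Spec.Units.start_decoder_C11b
import Vorbis.Spec.Units.start_decoder_C11c
import Vorbis.Spec.Units.start_decoder_C11d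
import Vorbis.Spec.Units.start_decoder_C11e
import Vorbis.Spec.Units.start_decoder_C11f
import Vorbis.Spec.Units.start_decoder_C11g
import Vorbis.Spec.Units.start_decoder_C12
import Vorbis.Spec.Units.start_decoder_C13
import Vorbis.Spec.Units.start_decoder_C13a
import Vorbis.Spec.Units.start_decoder_C13b
import Vorbis.Spec.Units.start_decoder_C13c
import Vorbis.Spec.Units.start_decoder_C13d
import Vorbis.Spec.Units.start_decoder_C14
import Vorbis.Spec.Units.start_decoder_C14a
import Vorbis.Spec.Units.start_decoder_C14b
import Vorbis.Spec.Units.start_decoder_C14c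
import Vorbis.Spec.Units.start_decoder_C15
import Vorbis.Spec.Units.start_decoder_C16
import Vorbis.Spec.Units.start_decoder_F1
import Vorbis.Spec.Units.start_decoder_F2
import Vorbis.Spec.Units.start_decoder_F2a
import Vorbis.Spec.Units.start_decoder_F2b
import Vorbis.Spec.Units.start_decoder_F2c
import Vorbis.Spec.Units.start_decoder_F2d
import Vorbis.Spec.Units.start_decoder_F3
import Vorbis.Spec.Units.start_decoder_F4
import Vorbis.Spec.Units.start_decoder_F4a
import Vorbis.Spec.Units.start_decoder_F4b
import Vorbis.Spec.Units.start_decoder_F4c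
import Vorbis.Spec.Units.start_decoder_F4d
import Vorbis.Spec.Units.start_decoder_F4e
import Vorbis.Spec.Units.start_decoder_F5
import Vorbis.Spec.Units.start_decoder_F5a
import Vorbis.Spec.Units.start_decoder_F5b
import Vorbis.Spec.Units.start_decoder_F5c
import Vorbis.Spec.Units.start_decoder_F5d
import Vorbis.Spec.Units.start_decoder_F5e
import Vorbis.Spec.Units.start_decoder_F5f
import Vorbis.Spec.Units.start_decoder_F6
import Vorbis.Spec.Units.start_decoder_F6a
import Vorbis.Spec.Units.start_decoder_F6b
import Vorbis.Spec.Units.start_decoder_F6c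
import Vorbis.Spec.Units.start_decoder_F6d
import Vorbis.Spec.Units.start_decoder_F7
import Vorbis.Spec.Units.start_decoder_R1
import Vorbis.Spec.Units.start_decoder_R1a
import Vorbis.Spec.Units.start_decoder_R1b
import Vorbis.Spec.Units.start_decoder_R1c
import Vorbis.Spec.Units.start_decoder_R1d
import Vorbis.Spec.Units.start_decoder_R2
import Vorbis.Spec.Units.start_decoder_R3
import Vorbis.Spec.Units.start_decoder_R4
import Vorbis.Spec.Units.start_decoder_R5
import Vorbis.Spec.Units.start_decoder_R6
import Vorbis.Spec.Units.start_decoder_R7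
import Vorbis.Spec.Units.start_decoder_R7a
import Vorbis.Spec.Units.start_decoder_R7b
import Vorbis.Spec.Units.start_decoder_R7c
import Vorbis.Spec.Units.start_decoder_R8
import Vorbis.Spec.Units.start_decoder_R9
import Vorbis.Spec.Units.start_decoder_R10
import Vorbis.Spec.Units.start_decoder_R10a
import Vorbis.Spec.Units.start_decoder_R10b
import Vorbis.Spec.Units.start_decoder_R10c
import Vorbis.Spec.Units.start_decoder_R10d
import Vorbis.Spec.Units.start_decoder_R10e
import Vorbis.Spec.Units.start_decoder_R11
import Vorbis.Spec.Units.start_decoder_R12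
import Vorbis.Spec.Units.start_decoder_R12a
import Vorbis.Spec.Units.start_decoder_R12b
import Vorbis.Spec.Units.start_decoder_R12c
import Vorbis.Spec.Units.start_decoder_R12d
import Vorbis.Spec.Units.start_decoder_R13
import Vorbis.Spec.Units.start_decoder_R14
import Vorbis.Spec.Units.start_decoder_R14a
import Vorbis.Spec.Units.start_decoder_R14b
import Vorbis.Spec.Units.start_decoder_R14c
import Vorbis.Spec.Units.start_decoder_R14d
import Vorbis.Spec.Units.start_decoder_R14e
import Vorbis.Spec.Units.start_decoder_R14f
import Vorbis.Spec.Units.start_decoder_R15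
import Vorbis.Spec.Units.start_decoder_R16
import Vorbis.Spec.Units.start_decoder_R16a
import Vorbis.Spec.Units.start_decoder_R16b
import Vorbis.Spec.Units.start_decoder_R16c
import Vorbis.Spec.Units.start_decoder_R16d
import Vorbis.Spec.Units.start_decoder_R16e
import Vorbis.Spec.Units.start_decoder_R17
import Vorbis.Spec.Units.start_decoder_R18
import Vorbis.Spec.Units.start_decoder_R19
import Vorbis.Spec.Units.start_decoder_COMPOSITION
import Vorbis.Spec.Units.stb_vorbis_open_memory
import Vorbis.Spec.Units.decode_all
import Vorbis.Spec.Units.decode_all_1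
import Vorbis.Spec.Units.decode_all_2
import Vorbis.Spec.Units.decode_all_3
import Vorbis.Spec.Units.decode_all_4
import Vorbis.Spec.Units.decode_all_5
import Vorbis.Spec.Units.decode_all_6
import Vorbis.Spec.Units.decode_all_7
import Vorbis.Spec.Units.decode_all_COMPOSITION
import Vorbis.Spec.Units.start_vorbis
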